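-- pv_equiv track=rewrite | github.com/shreykharbanda31/Data-Structures-and-Algorithms-S24 | HW4/sk10101_hw4_q5.py | is_number_of_lowercase_even
-- ===== SOURCE A (Python) =====
-- def is_number_of_lowercase_even(s, low, high):
--     if low > high:
--         return True
--     else:
--         if 97<=ord(s[low])<(97+26):
--             return not is_number_of_lowercase_even(s, low + 1, high)
--         else:
--             return is_number_of_lowercase_even(s, low + 1, high)
-- ===== SOURCE B (Python) =====
-- def is_number_of_lowercase_even(s, low, high):
--     count = 0
--     for i in range(low, high + 1):
--         if 97 <= ord(s[i]) < 123:
--             count += 1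
--     return count % 2 == 0
-- ===== Notes on version B (the rewrite author's own statement) =====
-- stated objective: simpler
-- what changed: Replaced the sign-flipping recursion with a single iterative pass that counts lowercase letters over range(low, high+1) and tests count % 2 == 0.
import Mathlib
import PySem

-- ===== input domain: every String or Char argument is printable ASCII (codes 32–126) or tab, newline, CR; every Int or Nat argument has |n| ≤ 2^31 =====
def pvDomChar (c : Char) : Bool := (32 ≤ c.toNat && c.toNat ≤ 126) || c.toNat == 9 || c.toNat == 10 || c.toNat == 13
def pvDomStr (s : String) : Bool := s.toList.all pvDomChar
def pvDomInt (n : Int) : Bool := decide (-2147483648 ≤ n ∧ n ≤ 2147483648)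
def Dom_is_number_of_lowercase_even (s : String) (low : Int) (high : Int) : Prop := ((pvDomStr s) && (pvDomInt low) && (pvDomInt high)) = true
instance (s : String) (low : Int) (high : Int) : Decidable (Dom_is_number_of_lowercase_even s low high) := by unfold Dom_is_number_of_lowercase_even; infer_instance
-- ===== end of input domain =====

-- B replaces A's sign-flipping recursion by one iterative counting pass over range(low, high+1), testing count % 2 == 0 (simpler decomposition; same cost).


-- ===== PORT A =====
-- recursion: empty range → True; lowercase at s[low] flips the recursive result.
-- s[low] with a possibly negative index is PySem.Str.pyGet?; none = IndexError, excluded by Pre_.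
def is_number_of_lowercase_even (s : String) (low : Int) (high : Int) : Bool :=
  if low > high then true
  else
    match PySem.Str.pyGet? s low with
    | none => true   -- IndexError in Python; outside Pre_
    | some c =>
      if 97 ≤ (c.toNat : Int) ∧ (c.toNat : Int) < 97 + 26 then
        !(is_number_of_lowercase_even s (low + 1) high)
      else
        is_number_of_lowercase_even s (low + 1) high
termination_by (high + 1 - low).toNat
decreasing_by all_goals omega

-- ===== PORT B =====
-- iterative pass: count lowercase over range(low, high+1), return count % 2 == 0
def is_number_of_lowercase_even_alt (s : String) (low : Int) (high : Int) : Bool :=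
  let count : Int :=
    (PySem.List.pyRange low (high + 1) 1).foldl
      (fun cnt i =>
        match PySem.Str.pyGet? s i with
        | some c => if 97 ≤ (c.toNat : Int) ∧ (c.toNat : Int) < 123 then cnt + 1 else cnt
        | none => cnt)   -- IndexError in Python; outside Pre_
      0
  PySem.Int.mod count 2 == 0

-- ===== PRECONDITION & SPEC =====
-- Pre_ excludes exactly the inputs where Python A (and B) raise IndexError:
-- a nonempty range [low, high] containing an index outside [-len(s), len(s)).
def Pre_is_number_of_lowercase_even (s : String) (low : Int) (high : Int) : Prop :=
  low > high ∨ (-(s.toList.length : Int) ≤ low ∧ high < (s.toList.length : Int))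
instance (s : String) (low : Int) (high : Int) : Decidable (Pre_is_number_of_lowercase_even s low high) := by unfold Pre_is_number_of_lowercase_even; infer_instance

def pvWitness_is_number_of_lowercase_even : String × Int × Int := ("aBc", 0, 2)

def Spec_is_number_of_lowercase_even (s : String) (low : Int) (high : Int) (out : Bool) : Prop := out = is_number_of_lowercase_even_alt s low high
instance (s : String) (low : Int) (high : Int) (out : Bool) : Decidable (Spec_is_number_of_lowercase_even s low high out) := by unfold Spec_is_number_of_lowercase_even; infer_instance

-- ===== CLAIM (what is proved, stated in full; the proofs are below) =====
def Claim_equal_is_number_of_lowercase_even : Prop := ∀ (s : String) (low : Int) (high : Int), Dom_is_number_of_lowercase_even s low high → Pre_is_number_of_lowercase_even s low high → Spec_is_number_of_lowercase_even s low high (is_number_of_lowercase_even s low high)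

-- ===== LEMMAS AND PROOFS =====

-- B's fold step
def pvStep (s : String) : Int → Int → Int := fun cnt i =>
  match PySem.Str.pyGet? s i with
  | some c => if 97 ≤ (c.toNat : Int) ∧ (c.toNat : Int) < 123 then cnt + 1 else cnt
  | none => cnt

theorem pvStep_shift (s : String) (l : List Int) :
    ∀ c : Int, l.foldl (pvStep s) c = c + l.foldl (pvStep s) 0 := by
  induction l with
  | nil => intro c; simp
  | cons x xs ih =>
    intro c
    simp only [List.foldl_cons]
    rw [ih (pvStep s c x), ih (pvStep s 0 x)]
    unfold pvStep
    cases PySem.Str.pyGet? s x with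
    | none => simp
    | some ch =>
      dsimp only
      split_ifs <;> ring

theorem pvParity_flip (m : Int) : (!(m % 2 == 0)) = ((1 + m) % 2 == 0) := by
  rcases Int.emod_two_eq m with h | h
  · have h1 : (1 + m) % 2 = 1 := by omega
    rw [h, h1]; decide
  · have h1 : (1 + m) % 2 = 0 := by omega
    rw [h, h1]; decide

theorem pvKey (s : String) : ∀ (n : Nat) (low high : Int),
    (high + 1 - low).toNat = n →
    (low > high ∨ (-(s.toList.length : Int) ≤ low ∧ high < (s.toList.length : Int))) →
    is_number_of_lowercase_even s low high =
      (((PySem.List.pyRange low (high + 1) 1).foldl (pvStep s) 0) % 2 == 0) := by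
  intro n
  induction n with
  | zero =>
    intro low high hn _
    have hlh : low > high := by omega
    rw [is_number_of_lowercase_even]
    rw [PySem.List.pyRange_one_eq_nil (by omega)]
    simp [hlh]
  | succ k ih =>
    intro low high hn hpre
    have hlh : ¬ low > high := by omega
    have hrange : -(s.toList.length : Int) ≤ low ∧ high < (s.toList.length : Int) := by
      rcases hpre with h | h
      · omega
      · exact h
    have hget : ∃ c, PySem.Str.pyGet? s low = some c := by
      cases h : PySem.Str.pyGet? s low with
      | some c => exact ⟨c, rfl⟩
      | none =>
        exfalso
        have h' : PySem.List.pyGet? s.toList low = none := by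
          simpa [PySem.Str.pyGet?] using h
        have := (PySem.List.pyGet?_eq_none_iff (xs := s.toList) (i := low)).mp h'
        exact this (by unfold PySem.Raise.InRange; omega)
    obtain ⟨c, hc⟩ := hget
    rw [is_number_of_lowercase_even, if_neg hlh, hc]
    rw [PySem.List.pyRange_one_cons (by omega)]
    rw [List.foldl_cons, pvStep_shift]
    have hrec := ih (low + 1) high (by omega)
      (by by_cases h : low + 1 > high
          · exact Or.inl h
          · exact Or.inr ⟨by omega, hrange.2⟩)
    dsimp only
    by_cases hlc : 97 ≤ (c.toNat : Int) ∧ (c.toNat : Int) < 97 + 26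
    · rw [if_pos hlc, hrec]
      have hstep : pvStep s 0 low = 1 := by
        unfold pvStep
        rw [hc]; dsimp only
        rw [if_pos (by omega : 97 ≤ (c.toNat : Int) ∧ (c.toNat : Int) < 123)]
        omega
      rw [hstep]
      exact pvParity_flip _
    · rw [if_neg hlc, hrec]
      have hstep : pvStep s 0 low = 0 := by
        unfold pvStep
        rw [hc]; dsimp only
        rw [if_neg (by omega : ¬ (97 ≤ (c.toNat : Int) ∧ (c.toNat : Int) < 123))]
      rw [hstep]
      simp

theorem pvAlt_eq (s : String) (low high : Int) :
    is_number_of_lowercase_even_alt s low high =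
      (((PySem.List.pyRange low (high + 1) 1).foldl (pvStep s) 0) % 2 == 0) := by
  show (PySem.Int.mod ((PySem.List.pyRange low (high + 1) 1).foldl (pvStep s) 0) 2 == 0) = _
  rw [PySem.Int.mod_eq_emod_of_pos (by norm_num : (0:Int) < 2)]

-- ===== VERDICT (by name: the statement is the Claim_ definition above) =====
theorem is_number_of_lowercase_even_spec : Claim_equal_is_number_of_lowercase_even := by
  intro s low high _ hpre
  unfold Spec_is_number_of_lowercase_even
  rw [pvAlt_eq]
  exact pvKey s (high + 1 - low).toNat low high rfl hpre
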